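-- pv_equiv track=rewrite | github.com/mingkycas/pda-automata | PDA.py | dpda_accepts
-- ===== SOURCE A (Python) =====
-- def dpda_accepts(input_string):
--     stack = []
--     state = "q0"
--     for char in input_string:
--         if state == "q0":
--             if char in {'a', 'b'}:
--                 stack.append(char)  # Push 'a' or 'b' onto the stack
--             elif char == 'c':
--                 state = "q1"
--             else:
--                 return "REJECTED"
--
--         elif state == "q1":
--             if char in {'a', 'b'}:
--                 if not stack or stack[-1] != char:
--                     return "REJECTED"
--                 stack.pop()
--             else:
--                 return "REJECTED"
--
--     return "ACCEPTED" if state == "q1" and not stack else "REJECTED"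
-- ===== SOURCE B (Python) =====
-- def dpda_accepts(input_string):
--     i = input_string.find('c')
--     if i == -1:
--         return "REJECTED"
--     first = input_string[:i]
--     second = input_string[i + 1:]
--     if any(ch != 'a' and ch != 'b' for ch in first):
--         return "REJECTED"
--     return "ACCEPTED" if second == first[::-1] else "REJECTED"
-- ===== Notes on version B (the rewrite author's own statement) =====
-- stated objective: simpler
-- what changed: Replaces the stateful DPDA simulation (explicit stack, state machine, early returns) by splitting the input at the first 'c', validating the prefix, and comparing the suffix with the reversed prefix.
import Mathlib
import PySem

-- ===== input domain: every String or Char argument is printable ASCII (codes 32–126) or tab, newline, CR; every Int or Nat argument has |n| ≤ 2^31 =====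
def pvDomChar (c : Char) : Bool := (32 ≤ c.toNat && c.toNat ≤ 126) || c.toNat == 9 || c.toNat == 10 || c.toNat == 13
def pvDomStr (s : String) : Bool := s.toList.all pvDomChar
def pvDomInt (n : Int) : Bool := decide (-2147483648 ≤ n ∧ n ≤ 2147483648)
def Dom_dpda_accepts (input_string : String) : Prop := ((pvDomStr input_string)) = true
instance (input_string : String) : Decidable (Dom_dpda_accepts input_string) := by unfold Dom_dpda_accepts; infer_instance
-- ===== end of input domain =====

-- B replaces A's stateful stack-automaton loop by a split at the first 'c' plus a
-- reversed-string comparison (objective: simpler; same O(n) cost).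

-- ===== PORT A =====
-- the DPDA loop: stack, state ("q0"/"q1"), early return on rejection
def pvDpdaLoop (l : List Char) (stack : List Char) (state : String) : String :=
  match l with
  | [] => if state = "q1" ∧ stack = [] then "ACCEPTED" else "REJECTED"
  | char :: rest =>
    if state = "q0" then
      if char = 'a' ∨ char = 'b' then pvDpdaLoop rest (stack ++ [char]) state
      else if char = 'c' then pvDpdaLoop rest stack "q1"
      else "REJECTED"
    else if state = "q1" then
      if char = 'a' ∨ char = 'b' then
        if stack = [] ∨ stack.getLast? ≠ some char then "REJECTED"
        else pvDpdaLoop rest stack.dropLast state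
      else "REJECTED"
    else pvDpdaLoop rest stack state

def dpda_accepts (input_string : String) : String :=
  pvDpdaLoop input_string.toList [] "q0"

-- ===== PORT B =====
def dpda_accepts_alt (input_string : String) : String :=
  let l := input_string.toList
  let i := PySem.Chars.find l ['c']          -- input_string.find('c')
  if i = -1 then "REJECTED"
  else
    let first := PySem.List.slice l none (some i)          -- input_string[:i]
    let second := PySem.List.slice l (some (i + 1)) none   -- input_string[i+1:]
    if first.any (fun ch => ch != 'a' && ch != 'b') then "REJECTED"
    else if second = first.reverse then "ACCEPTED" else "REJECTED"
    -- first[::-1] is first.reverse (PySem.List.slice?_none_none_neg_one)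

-- ===== PRECONDITION & SPEC =====
def Spec_dpda_accepts (input_string : String) (out : String) : Prop := out = dpda_accepts_alt input_string
instance (input_string : String) (out : String) : Decidable (Spec_dpda_accepts input_string out) := by unfold Spec_dpda_accepts; infer_instance

-- ===== CLAIM (what is proved, stated in full; the proofs are below) =====
def Claim_equal_dpda_accepts : Prop := ∀ (input_string : String), Dom_dpda_accepts input_string → Spec_dpda_accepts input_string (dpda_accepts input_string)

-- ===== LEMMAS AND PROOFS =====

theorem pvLoop_q1 (l st : List Char) (hst : ∀ c ∈ st, c = 'a' ∨ c = 'b') :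
    pvDpdaLoop l st "q1" = if l = st.reverse then "ACCEPTED" else "REJECTED" := by
  induction l generalizing st with
  | nil =>
    by_cases h : st = [] <;> simp [pvDpdaLoop, h]
  | cons c rest ih =>
    simp only [pvDpdaLoop]
    rw [if_neg (by decide : ¬ ("q1":String) = "q0")]
    simp only [if_true]
    by_cases hc : c = 'a' ∨ c = 'b'
    · rw [if_pos hc]
      by_cases hrej : st = [] ∨ st.getLast? ≠ some c
      · rw [if_pos hrej]
        have : ¬ (c :: rest = st.reverse) := by
          intro he
          rcases hrej with h0 | h0
          · subst h0; simp at he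
          · apply h0
            rw [← List.head?_reverse, ← he]; rfl
        rw [if_neg this]
      · rw [if_neg hrej]
        push Not at hrej
        obtain ⟨hne, hlast⟩ := hrej
        have hdec : st = st.dropLast ++ [c] := Eq.symm (List.dropLast_append_getLast? c hlast)
        have hmem : ∀ x ∈ st.dropLast, x = 'a' ∨ x = 'b' := fun x hx =>
          hst x (List.dropLast_sublist st |>.mem hx)
        rw [ih _ hmem]
        have hrv : st.reverse = c :: st.dropLast.reverse := by
          conv_lhs => rw [hdec]
          simp
        rw [hrv]
        by_cases hr : rest = st.dropLast.reverse <;> simp [hr]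
    · rw [if_neg hc]
      have : ¬ (c :: rest = st.reverse) := by
        intro he
        have : c ∈ st := by
          have : c ∈ st.reverse := by rw [← he]; simp
          simpa using this
        exact hc (hst c this)
      rw [if_neg this]

theorem pvLoop_q0_no_c (l acc : List Char) (h : 'c' ∉ l) :
    pvDpdaLoop l acc "q0" = "REJECTED" := by
  induction l generalizing acc with
  | nil => simp [pvDpdaLoop]
  | cons c rest ih =>
    have hc : c ≠ 'c' := fun he => h (he ▸ List.mem_cons_self)
    have hr : 'c' ∉ rest := fun hm => h (List.mem_cons_of_mem _ hm)
    simp only [pvDpdaLoop, if_true]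
    by_cases hab : c = 'a' ∨ c = 'b'
    · rw [if_pos hab]; exact ih _ hr
    · rw [if_neg hab, if_neg hc]

theorem pvLoop_q0 (l acc : List Char) (k : Nat)
    (hacc : ∀ c ∈ acc, c = 'a' ∨ c = 'b')
    (hlt : ∀ j < k, l[j]? ≠ some 'c') (hk : l[k]? = some 'c') :
    pvDpdaLoop l acc "q0" =
      if (l.take k).any (fun ch => ch != 'a' && ch != 'b') then "REJECTED"
      else if l.drop (k + 1) = (acc ++ l.take k).reverse then "ACCEPTED"
      else "REJECTED" := by
  induction l generalizing acc k with
  | nil => simp at hk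
  | cons c rest ih =>
    simp only [pvDpdaLoop, if_true]
    cases k with
    | zero =>
      simp only [List.getElem?_cons_zero, Option.some.injEq] at hk
      subst hk
      rw [if_neg (by decide : ¬ ('c' = 'a' ∨ 'c' = 'b')), if_pos rfl]
      rw [pvLoop_q1 _ _ hacc]
      simp
    | succ k =>
      have hc0 : c ≠ 'c' := by
        have := hlt 0 (Nat.succ_pos k)
        simpa using this
      have hk' : rest[k]? = some 'c' := by simpa using hk
      have hlt' : ∀ j < k, rest[j]? ≠ some 'c' := fun j hj => by
        have := hlt (j + 1) (Nat.succ_lt_succ hj)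
        simpa using this
      by_cases hab : c = 'a' ∨ c = 'b'
      · rw [if_pos hab]
        rw [ih (acc ++ [c]) k (by
          intro x hx
          rcases List.mem_append.mp hx with h | h
          · exact hacc x h
          · simp at h; subst h; exact hab) hlt' hk']
        have hval : (c != 'a' && c != 'b') = false := by
          rcases hab with h | h <;> simp [h]
        simp only [List.take_succ_cons, List.drop_succ_cons, List.any_cons, hval,
          Bool.false_or, List.append_assoc, List.singleton_append]
        rfl
      · rw [if_neg hab, if_neg hc0]
        have hval : (c != 'a' && c != 'b') = true := by
          simp only [not_or] at hab
          simp [hab.1, hab.2]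
        rw [if_pos (by simp [hval])]

-- [a] is a prefix of m iff m starts with a
theorem pvSingleton_prefix (m : List Char) (a : Char) : [a] <+: m ↔ m.head? = some a := by
  cases m <;> simp [List.cons_prefix_cons, eq_comm]

-- ===== VERDICT (by name: the statement is the Claim_ definition above) =====
theorem dpda_accepts_spec : Claim_equal_dpda_accepts := by
  intro s _
  unfold Spec_dpda_accepts dpda_accepts dpda_accepts_alt
  set l := s.toList with hl
  by_cases hI : PySem.Chars.find l ['c'] = -1
  · rw [if_pos hI]
    have hnotin : 'c' ∉ l := by
      intro hm
      exact (PySem.Chars.find_eq_neg_one_iff l ['c']).mp hI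
        ((List.singleton_infix_iff 'c' l).mpr hm)
    exact pvLoop_q0_no_c l [] hnotin
  · rw [if_neg hI]
    have hge : 0 ≤ PySem.Chars.find l ['c'] := by
      have := PySem.Chars.neg_one_le_find l ['c']
      omega
    obtain ⟨hpre, hmin⟩ := PySem.Chars.find_spec (s := l) (sub := ['c']) hge
    set i := PySem.Chars.find l ['c'] with hi
    set k := i.toNat with hkdef
    have hik : i = (k : Int) := by omega
    have hk : l[k]? = some 'c' := by
      rw [← List.head?_drop]
      exact (pvSingleton_prefix _ _).mp hpre
    have hlt : ∀ j < k, l[j]? ≠ some 'c' := by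
      intro j hj hje
      exact hmin j hj ((pvSingleton_prefix _ _).mpr (by rw [List.head?_drop]; exact hje))
    have h1 : PySem.List.slice l none (some i) = l.take k := by
      rw [PySem.List.slice_to l hge]
    have h2 : PySem.List.slice l (some (i + 1)) none = l.drop (k + 1) := by
      rw [PySem.List.slice_from l (by omega : (0:Int) ≤ i + 1)]
      congr 1
      omega
    rw [h1, h2, pvLoop_q0 l [] k (by simp) hlt hk]
    simp only [List.nil_append]
    rfl
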